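-- pv_equiv track=rewrite | github.com/Mihajlovicka/nine-men-moris | Projakt ASP mice/board.py | izbaci_random_figuru
-- ===== SOURCE A (Python) =====
-- import copy
--
-- moris_formacije = [[[1,2],[9,21]],[[0,2],[4,7]],[[0,1],[14,23]],[[4,5],[10,18]],[[3,5],[1,7]],[[3,4],[13,20]],[[7,8],[11,15]],[[1,4],[6,8]],[[6,7],[12,17]],
--                    [[0,21],[10,11]],[[3,18],[9,11]],[[6,15],[9,10]],[[8,17],[13,14]],[[5,20],[12,14]],[[2,23],[12,13]],[[6,11],[16,17]],[[15,17],[19,22]],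
--                    [[15,16],[8,12]],[[3,10],[19,20]],[[16,22],[18,20]],[[5,13],[18,19]],[[0,9],[22,23]],[[16,19],[21,23]],[[2,14],[21,22]]]
--
-- WHITE = 'W'
--
-- BLACK = 'B'
--
-- def promeni_igraca(igrac):
--     if igrac == WHITE:
--         return BLACK
--     return WHITE
--
-- def izbaci_random_figuru(tabla,igrac):
--     potezi = []
--     for i in range(len(tabla)):
--         if tabla[i] == promeni_igraca(igrac):
--             if not da_li_je_moris(tabla,promeni_igraca(igrac),i):
--                 nov_potez = copy.deepcopy(tabla)
--                 nov_potez[i] = 'O'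
--                 potezi.append(nov_potez)
--     if not potezi:
--         if broj_figura(tabla,promeni_igraca(igrac)) == broj_mica(tabla,promeni_igraca(igrac)) *3:
--             for i in range(len(tabla)):
--                 if tabla[i] == promeni_igraca(igrac):
--                     nov_potez = copy.deepcopy(tabla)
--                     nov_potez[i] = 'O'
--                     potezi.append(nov_potez)
--     return potezi
--
-- def da_li_je_moris(tabla,igrac,polje):
--     morisi = moris_formacije[polje]
--     if tabla[morisi[0][0]] == igrac and tabla[morisi[0][1]] == igrac:
--         return True
--     if tabla[morisi[1][0]] == igrac and tabla[morisi[1][1]] == igrac: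
--         return True
--     return False
--
-- def broj_mica(tabla,igrac):
--     br = 0
--     for i in range(len(tabla)):
--         if tabla[i] == igrac:
--             morisi = moris_formacije[i]
--             if tabla[morisi[0][0]] == igrac and tabla[morisi[0][1]] == igrac:
--                 br +=1
--             if tabla[morisi[1][0]] == igrac and tabla[morisi[1][1]] == igrac:
--                 br +=1
--     return br // 3
--
-- def broj_figura(tabla,igrac):
--     i = 0
--     for j in range(len(tabla)):
--         if tabla[j] == igrac: i +=1
--     return i
-- ===== SOURCE B (Python) =====
-- # B works from the 16 mill LINES of the board (triples of cells) instead of A's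
-- # per-cell formation table: it finds the completed opponent mills once, derives the
-- # blocked cells from them, and uses "#pieces == 3 * #complete mills" as the fallback
-- # test (equivalent to A's memberships//3*3 arithmetic, since each complete mill
-- # contributes exactly 3 memberships).
-- MILLS = [[0, 1, 2], [0, 9, 21], [1, 4, 7], [2, 14, 23], [3, 4, 5], [3, 10, 18],
--          [5, 13, 20], [6, 7, 8], [6, 11, 15], [8, 12, 17], [9, 10, 11], [12, 13, 14],
--          [15, 16, 17], [16, 19, 22], [18, 19, 20], [21, 22, 23]]
--
--
-- def izbaci_random_figuru(tabla, igrac):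
--     opp = 'B' if igrac == 'W' else 'W'
--     opp_cells = [i for i in range(len(tabla)) if tabla[i] == opp]
--     occupied = set(opp_cells)
--     full = [t for t in MILLS if all(j in occupied for j in t)]
--     free = [i for i in opp_cells if not any(i in t for t in full)]
--     if free:
--         idxs = free
--     elif len(opp_cells) == 3 * len(full):
--         idxs = opp_cells
--     else:
--         idxs = []
--     moves = []
--     for k in idxs:
--         nov = list(tabla)
--         nov[k] = 'O'
--         moves.append(nov)
--     return moves
-- ===== Notes on version B (the rewrite author's own statement) =====
-- stated objective: alternative
-- what changed: B works from the board's 16 mill LINES (cell triples) instead of A's per-cell formation table: it computes the occupied-cell set once, lists the completed opponent mills, derives blocked cells as members of those mills, and replaces A's memberships//3*3 fallback arithmetic with the equivalent 'piece count == 3 * number of complete mills' (each complete mill contributes exactly 3 memberships).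
import Mathlib
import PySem

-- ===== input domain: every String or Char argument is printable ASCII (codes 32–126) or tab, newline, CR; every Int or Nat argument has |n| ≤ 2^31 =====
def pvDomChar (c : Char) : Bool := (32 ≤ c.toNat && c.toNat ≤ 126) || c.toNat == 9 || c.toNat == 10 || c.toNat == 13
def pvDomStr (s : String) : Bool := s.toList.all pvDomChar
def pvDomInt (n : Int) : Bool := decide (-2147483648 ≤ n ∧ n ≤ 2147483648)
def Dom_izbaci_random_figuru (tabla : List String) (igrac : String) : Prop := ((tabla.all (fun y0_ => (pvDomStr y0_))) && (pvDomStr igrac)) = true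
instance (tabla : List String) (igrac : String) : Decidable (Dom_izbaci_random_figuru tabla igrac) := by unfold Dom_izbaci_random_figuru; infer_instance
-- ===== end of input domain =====

-- B recasts the task over the board's 16 mill LINES (cell triples) instead of A's per-cell
-- formation table: completed opponent mills are listed once and blocked cells derived from
-- them, with 'piece count == 3 * complete mills' as the fallback test (objective: alternative).

-- the module constant moris_formacije (per cell: two formations, each a pair of the other cells)
def pvMoris : List (List (Nat × Nat)) :=
  [[(1,2),(9,21)], [(0,2),(4,7)], [(0,1),(14,23)], [(4,5),(10,18)], [(3,5),(1,7)], [(3,4),(13,20)],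
   [(7,8),(11,15)], [(1,4),(6,8)], [(6,7),(12,17)],
   [(0,21),(10,11)], [(3,18),(9,11)], [(6,15),(9,10)], [(8,17),(13,14)], [(5,20),(12,14)], [(2,23),(12,13)],
   [(6,11),(16,17)], [(15,17),(19,22)],
   [(15,16),(8,12)], [(3,10),(19,20)], [(16,22),(18,20)], [(5,13),(18,19)], [(0,9),(22,23)],
   [(16,19),(21,23)], [(2,14),(21,22)]]

-- ===== PORT A =====
-- indexing tabla[j] / moris_formacije[polje] is ported with getD; Python raises IndexError out of
-- range, which Pre_ excludes, so the port is exact on Pre_.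
def promeni_igraca (igrac : String) : String := if igrac == "W" then "B" else "W"

def da_li_je_moris (tabla : List String) (igrac : String) (polje : Nat) : Bool :=
  let morisi := pvMoris.getD polje []
  let m0 := morisi.getD 0 (0, 0)
  let m1 := morisi.getD 1 (0, 0)
  if tabla.getD m0.1 "" == igrac && tabla.getD m0.2 "" == igrac then true
  else if tabla.getD m1.1 "" == igrac && tabla.getD m1.2 "" == igrac then true
  else false

def broj_mica (tabla : List String) (igrac : String) : Nat :=
  ((List.range tabla.length).foldl (fun br i =>
    if tabla.getD i "" == igrac then
      let morisi := pvMoris.getD i []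
      let m0 := morisi.getD 0 (0, 0)
      let m1 := morisi.getD 1 (0, 0)
      let br1 := if tabla.getD m0.1 "" == igrac && tabla.getD m0.2 "" == igrac then br + 1 else br
      if tabla.getD m1.1 "" == igrac && tabla.getD m1.2 "" == igrac then br1 + 1 else br1
    else br) 0) / 3

def broj_figura (tabla : List String) (igrac : String) : Nat :=
  (List.range tabla.length).foldl (fun i j => if tabla.getD j "" == igrac then i + 1 else i) 0

def izbaci_random_figuru (tabla : List String) (igrac : String) : List (List String) :=
  let potezi := (List.range tabla.length).foldl (fun acc i =>
      if tabla.getD i "" == promeni_igraca igrac && !(da_li_je_moris tabla (promeni_igraca igrac) i)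
      then acc ++ [tabla.set i "O"] else acc) []
  if potezi.isEmpty then
    if broj_figura tabla (promeni_igraca igrac) == broj_mica tabla (promeni_igraca igrac) * 3 then
      (List.range tabla.length).foldl (fun acc i =>
        if tabla.getD i "" == promeni_igraca igrac then acc ++ [tabla.set i "O"] else acc) []
    else potezi
  else potezi

-- ===== PORT B =====
-- the 16 mill lines of the board, as triples of cells (module constant MILLS of Source B)
def pvMills : List (List Nat) :=
  [[0, 1, 2], [0, 9, 21], [1, 4, 7], [2, 14, 23], [3, 4, 5], [3, 10, 18],
   [5, 13, 20], [6, 7, 8], [6, 11, 15], [8, 12, 17], [9, 10, 11], [12, 13, 14],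
   [15, 16, 17], [16, 19, 22], [18, 19, 20], [21, 22, 23]]

def izbaci_random_figuru_alt (tabla : List String) (igrac : String) : List (List String) :=
  let opp := if igrac == "W" then "B" else "W"
  let oppCells := (List.range tabla.length).filter (fun i => tabla.getD i "" == opp)
  let occupied : PySem.Set Nat := PySem.Set.ofList oppCells
  let full := pvMills.filter (fun t => t.all (fun j => occupied.contains j))
  let free := oppCells.filter (fun i => !(full.any (fun t => t.contains i)))
  let idxs :=
    if !free.isEmpty then free
    else if oppCells.length == 3 * full.length then oppCells
    else []
  idxs.foldl (fun moves k => moves ++ [tabla.set k "O"]) []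

-- ===== PRECONDITION & SPEC =====
-- Pre_ restricts to the game's natural domain of 24-cell boards (Nine Men's Morris) plus
-- opponent-free boards of any length (where A trivially returns []): on boards of other
-- lengths that hold opponent pieces, A's indexing into the fixed 24-entry formation table
-- (or into the board at a formation cell beyond its end) can raise IndexError, and whether
-- it does depends on and-short-circuit accidents of A's code.
def Pre_izbaci_random_figuru (tabla : List String) (igrac : String) : Prop :=
  tabla.length = 24 ∨ ∀ s ∈ tabla, s ≠ (if igrac == "W" then "B" else "W")
instance (tabla : List String) (igrac : String) : Decidable (Pre_izbaci_random_figuru tabla igrac) := by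
  unfold Pre_izbaci_random_figuru; infer_instance

def pvWitness_izbaci_random_figuru : List String × String :=
  (["W","B","B","O","O","O","O","O","O","O","O","O","O","O","O","O","O","O","O","O","O","O","O","B"], "W")

def Spec_izbaci_random_figuru (tabla : List String) (igrac : String) (out : List (List String)) : Prop := out = izbaci_random_figuru_alt tabla igrac
instance (tabla : List String) (igrac : String) (out : List (List String)) : Decidable (Spec_izbaci_random_figuru tabla igrac out) := by unfold Spec_izbaci_random_figuru; infer_instance

-- ===== CLAIM (what is proved, stated in full; the proofs are below) =====
def Claim_equal_izbaci_random_figuru : Prop := ∀ (tabla : List String) (igrac : String), Dom_izbaci_random_figuru tabla igrac → Pre_izbaci_random_figuru tabla igrac → Spec_izbaci_random_figuru tabla igrac (izbaci_random_figuru tabla igrac)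

-- ===== LEMMAS AND PROOFS =====

-- shape facts about the two literal tables
theorem pv_len_two (i : Nat) (h : i < 24) : (pvMoris.getD i []).length = 2 := by
  interval_cases i <;> rfl

theorem pv_mills_facts : ∀ t ∈ pvMills, t.length = 3 ∧ t.Nodup ∧ ∀ j ∈ t, j < 24 := by decide

-- bridge between the two tables: the mills through cell i, with i removed, are exactly
-- (a permutation of) cell i's two formations
theorem pv_tbl : ∀ i, i < 24 →
    ((pvMills.filter (fun t => t.contains i)).map (fun t => t.erase i)).Perm
      ((pvMoris.getD i []).map (fun p => [p.1, p.2])) := by decide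

theorem pv_all_erase {t : List Nat} {i : Nat} (hi : i ∈ t) (b : Nat → Bool) (hb : b i = true) :
    t.all b = (t.erase i).all b := by
  rw [List.Perm.all_eq (List.perm_cons_erase hi)]; simp [hb]

theorem pv_split (L : List Nat) (f : Nat → Nat) (p : Nat → Bool) :
    (L.map (fun i => f i + (if p i then 1 else 0))).sum = (L.map f).sum + L.countP p := by
  induction L with
  | nil => simp
  | cons x L ih => simp [List.countP_cons, ih]; split <;> omega

theorem pv_sum_countP (L : List Nat) (M : List (List Nat)) (P : Nat → List Nat → Bool) :
    (L.map (fun i => M.countP (P i))).sum = (M.map (fun t => L.countP (fun i => P i t))).sum := by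
  induction M with
  | nil => simp
  | cons t M ih =>
    simp only [List.countP_cons, List.map_cons, List.sum_cons, pv_split, ih]
    omega

theorem pv_countP_mem (S t : List Nat) (hS : S.Nodup) (ht : t.Nodup) (hsub : ∀ j ∈ t, j ∈ S) :
    S.countP (fun i => t.contains i) = t.length := by
  rw [List.countP_eq_length_filter]
  refine List.Perm.length_eq ?_
  refine (List.perm_ext_iff_of_nodup (hS.filter _) ht).mpr ?_
  intro x
  simp only [List.mem_filter, List.contains_iff_mem]
  exact ⟨fun h => h.2, fun h => ⟨hsub x h, h⟩⟩

theorem pv_sum_ite3 (M : List (List Nat)) (p : List Nat → Bool) :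
    (M.map (fun t => if p t then 3 else 0)).sum = 3 * M.countP p := by
  induction M with
  | nil => simp
  | cons t M ih => simp [List.countP_cons, ih]; split <;> omega

theorem pv_foldl_len {α : Type} (l : List α) (a : Nat) :
    l.foldl (fun acc _ => acc + 1) a = a + l.length := by
  induction l generalizing a with
  | nil => simp
  | cons x xs ih => simp [List.foldl, ih]; omega

theorem pv_fold_add {f : Nat → Nat → Nat} (g : Nat → Nat) (l : List Nat)
    (hf : ∀ a x, x ∈ l → f a x = a + g x) (a : Nat) :
    l.foldl f a = a + (l.map g).sum := by
  induction l generalizing a with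
  | nil => simp
  | cons x xs ih =>
    rw [List.foldl_cons, hf a x (by simp), ih (fun a x hx => hf a x (by simp [hx]))]
    simp [Nat.add_assoc]

theorem pv_mica_body (tabla : List String) (igrac : String) (i : Nat) (h : i < 24) (br : Nat) :
    (let morisi := pvMoris.getD i []
     let m0 := morisi.getD 0 (0, 0)
     let m1 := morisi.getD 1 (0, 0)
     let br1 := if tabla.getD m0.1 "" == igrac && tabla.getD m0.2 "" == igrac then br + 1 else br
     if tabla.getD m1.1 "" == igrac && tabla.getD m1.2 "" == igrac then br1 + 1 else br1)
    = br + (pvMoris.getD i []).countP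
        (fun p => tabla.getD p.1 "" == igrac && tabla.getD p.2 "" == igrac) := by
  have hl := pv_len_two i h
  generalize pvMoris.getD i [] = l at hl ⊢
  match l, hl with
  | [a, b], _ =>
    simp only [List.getD]
    cases h1 : (tabla[a.1]?.getD "" == igrac && tabla[a.2]?.getD "" == igrac) <;>
    cases h2 : (tabla[b.1]?.getD "" == igrac && tabla[b.2]?.getD "" == igrac) <;>
      simp [h1, h2]

-- da_li_je_moris as an `any` over cell i's formations
theorem pv_da_any (tabla : List String) (igrac : String) (i : Nat) (h : i < 24) :
    da_li_je_moris tabla igrac i =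
      (pvMoris.getD i []).any (fun p => tabla.getD p.1 "" == igrac && tabla.getD p.2 "" == igrac) := by
  have hl := pv_len_two i h
  unfold da_li_je_moris
  generalize pvMoris.getD i [] = l at hl ⊢
  match l, hl with
  | [a, b], _ =>
    simp only [List.getD]
    cases h1 : (tabla[a.1]?.getD "" == igrac && tabla[a.2]?.getD "" == igrac) <;>
    cases h2 : (tabla[b.1]?.getD "" == igrac && tabla[b.2]?.getD "" == igrac) <;>
      simp [h1, h2]

theorem pv_all_congr {α : Type} {l : List α} {f g : α → Bool} (h : ∀ x ∈ l, f x = g x) :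
    l.all f = l.all g := by
  induction l with
  | nil => rfl
  | cons x xs ih => simp_all

theorem izbaci_random_figuru_spec : Claim_equal_izbaci_random_figuru := by
  intro tabla igrac _ hpre
  unfold Spec_izbaci_random_figuru
  have hid : promeni_igraca igrac = (if igrac == "W" then "B" else "W") := rfl
  set opp := if igrac == "W" then "B" else "W" with hopp
  set S := (List.range tabla.length).filter (fun i => tabla.getD i "" == opp) with hS
  unfold izbaci_random_figuru izbaci_random_figuru_alt
  rw [hid, ← hopp]
  simp only [PySem.List.foldl_append_if, PySem.List.foldl_append_singleton_eq_map,
    List.nil_append, ← hS]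
  rcases hpre with h24 | hfree
  · -- the board has 24 cells
    have hS_nodup : S.Nodup := List.Nodup.filter _ List.nodup_range
    have hmemS : ∀ j, j ∈ S ↔ j < 24 ∧ (tabla.getD j "" == opp) = true := by
      intro j; rw [hS]; simp [List.mem_filter, h24]
    have hcont : ∀ j, j < 24 → (PySem.Set.ofList S).contains j = (tabla.getD j "" == opp) := by
      intro j hj
      cases hbj : (tabla.getD j "" == opp) with
      | true =>
        exact (PySem.Set.contains_iff _ _).mpr ((PySem.Set.mem_ofList _ _).mpr ((hmemS j).mpr ⟨hj, hbj⟩))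
      | false =>
        cases hc : (PySem.Set.ofList S).contains j with
        | true =>
          have := ((hmemS j).mp ((PySem.Set.mem_ofList _ _).mp ((PySem.Set.contains_iff _ _).mp hc))).2
          rw [this] at hbj; exact hbj
        | false => rfl
    set F := pvMills.filter (fun t => t.all (fun j => tabla.getD j "" == opp)) with hF
    have hFull : pvMills.filter (fun t => t.all (fun j => (PySem.Set.ofList S).contains j)) = F := by
      rw [hF]
      refine List.filter_congr (fun t ht => ?_)
      exact pv_all_congr (fun j hj => hcont j ((pv_mills_facts t ht).2.2 j hj))
    have hsubF : ∀ t ∈ F, ∀ j ∈ t, j ∈ S := by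
      intro t ht j hj
      have hall := (List.mem_filter.mp ht).2
      have := List.all_eq_true.mp hall j hj
      exact (hmemS j).mpr ⟨(pv_mills_facts t (List.mem_filter.mp ht).1).2.2 j hj, this⟩
    -- per-cell bridge: blocked ↔ da_li_je_moris, and the membership count
    have hDa : ∀ i ∈ S, (F.any (fun t => t.contains i)) = da_li_je_moris tabla opp i := by
      intro i hiS
      obtain ⟨hi24, hbi⟩ := (hmemS i).mp hiS
      rw [pv_da_any tabla opp i hi24, hF, List.any_filter]
      have h1 : (pvMills.any fun t => (t.all fun j => tabla.getD j "" == opp) && t.contains i)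
          = (pvMills.filter (fun t => t.contains i)).any (fun t => t.all fun j => tabla.getD j "" == opp) := by
        rw [List.any_filter]
        exact PySem.List.any_congr_mem (fun t _ => Bool.and_comm _ _)
      rw [h1]
      have h2 : (pvMills.filter (fun t => t.contains i)).any (fun t => t.all fun j => tabla.getD j "" == opp)
          = ((pvMills.filter (fun t => t.contains i)).map (fun t => t.erase i)).any
              (fun l => l.all fun j => tabla.getD j "" == opp) := by
        rw [List.any_map]
        refine PySem.List.any_congr_mem (fun t ht => ?_)
        exact pv_all_erase (List.mem_of_elem_eq_true (List.mem_filter.mp ht).2) _ hbi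
      rw [h2, List.Perm.any_eq (pv_tbl i hi24), List.any_map]
      refine PySem.List.any_congr_mem (fun p _ => ?_)
      simp
    have hCnt : ∀ i ∈ S,
        (pvMoris.getD i []).countP (fun p => tabla.getD p.1 "" == opp && tabla.getD p.2 "" == opp)
          = pvMills.countP (fun t => (t.all fun j => tabla.getD j "" == opp) && t.contains i) := by
      intro i hiS
      obtain ⟨hi24, hbi⟩ := (hmemS i).mp hiS
      have h1 : pvMills.countP (fun t => (t.all fun j => tabla.getD j "" == opp) && t.contains i)
          = List.countP (fun t => t.all fun j => tabla.getD j "" == opp) (pvMills.filter (fun t => t.contains i)) := by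
        rw [List.countP_filter]
      rw [h1]
      have h2 : List.countP (fun t => t.all fun j => tabla.getD j "" == opp) (pvMills.filter (fun t => t.contains i))
          = List.countP (fun l => l.all fun j => tabla.getD j "" == opp)
              ((pvMills.filter (fun t => t.contains i)).map (fun t => t.erase i)) := by
        rw [List.countP_map]
        refine List.countP_congr (fun t ht => ?_)
        rw [Function.comp_apply,
          ← pv_all_erase (List.mem_of_elem_eq_true (List.mem_filter.mp ht).2) _ hbi]
      rw [h2, List.Perm.countP_eq _ (pv_tbl i hi24), List.countP_map]
      refine (List.countP_congr (fun p _ => ?_)).symm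
      simp
    have hfig : broj_figura tabla opp = S.length := by
      unfold broj_figura
      rw [PySem.List.foldl_if_eq_foldl_filter, pv_foldl_len]
      simp [hS]
    have hmica : broj_mica tabla opp = F.length := by
      unfold broj_mica
      rw [PySem.List.foldl_if_eq_foldl_filter, ← hS]
      rw [pv_fold_add (g := fun i => (pvMoris.getD i []).countP
            (fun p => tabla.getD p.1 "" == opp && tabla.getD p.2 "" == opp))
          S (fun a i hiS => pv_mica_body tabla opp i ((hmemS i).mp hiS).1 a)]
      rw [List.map_congr_left hCnt, pv_sum_countP]
      have h3 : ∀ t ∈ pvMills,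
          S.countP (fun i => (t.all fun j => tabla.getD j "" == opp) && t.contains i)
            = if (t.all fun j => tabla.getD j "" == opp) then 3 else 0 := by
        intro t ht
        cases hab : (t.all fun j => tabla.getD j "" == opp) with
        | false => simp
        | true =>
          simp only [Bool.true_and, if_true]
          have htF : t ∈ F := by rw [hF]; exact List.mem_filter.mpr ⟨ht, hab⟩
          rw [pv_countP_mem S t hS_nodup (pv_mills_facts t ht).2.1 (hsubF t htF)]
          exact (pv_mills_facts t ht).1
      rw [List.map_congr_left h3, pv_sum_ite3, List.countP_eq_length_filter, ← hF]
      simp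
    -- assemble
    have hfilt : (List.range tabla.length).filter
        (fun i => tabla.getD i "" == opp && !(da_li_je_moris tabla opp i))
        = S.filter (fun i => !(F.any (fun t => t.contains i))) := by
      rw [hS, List.filter_filter]
      refine List.filter_congr (fun i hi => ?_)
      cases hbi : (tabla.getD i "" == opp) with
      | false => simp
      | true =>
        have hiS : i ∈ S := by rw [hS]; exact List.mem_filter.mpr ⟨hi, hbi⟩
        rw [hDa i hiS, Bool.and_comm]
    rw [hfilt, hfig, hmica, hFull, List.isEmpty_map, Nat.mul_comm F.length 3]
    cases hfr : (List.filter (fun i => !F.any fun t => t.contains i) S).isEmpty with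
    | false => simp
    | true =>
      have hnil := List.isEmpty_iff.mp hfr
      cases hc : (S.length == 3 * F.length) with
      | true => simp
      | false => rw [hnil]; simp
  · -- no opponent piece on the board: both sides are []
    have hb : ∀ i ∈ List.range tabla.length, (tabla.getD i "" == opp) = false := by
      intro i hi
      have hlt : i < tabla.length := List.mem_range.mp hi
      have hmem : tabla.getD i "" ∈ tabla := by
        rw [List.getD_eq_getElem _ _ hlt]; exact List.getElem_mem _
      exact beq_eq_false_iff_ne.mpr (hfree _ hmem)
    have hSnil : S = [] := by
      rw [hS]
      refine List.filter_eq_nil_iff.mpr (fun i hi => ?_)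
      rw [hb i hi]
      simp
    have hnil2 : (List.range tabla.length).filter
        (fun i => tabla.getD i "" == opp && !(da_li_je_moris tabla opp i)) = [] := by
      refine List.filter_eq_nil_iff.mpr (fun i hi => ?_)
      rw [hb i hi, Bool.false_and]
      simp
    rw [hSnil, hnil2]
    simp
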